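-- pv_equiv track=rewrite | github.com/iejones/BenchMarks | wordCuration/makeOneAwayDict.py | makeOneAwayDictionary
-- ===== SOURCE A (Python) =====
-- from collections import Counter
--
-- def checkOneAway(start, end):
--     # if not the same length, reject
--     if len(start) != len(end):
--         return False, None
--
--     # could number of each letter
--     startCounter = Counter(start)
--     endCounter = Counter(end)
--     oldLetter = None
--     newLetter = None
--
--     # for every letter in start word, check for that letter in end word
--     for key, value in startCounter.items():
--         if key not in endCounter:
--             if oldLetter:
--                 # more than one letter in end word that is not in end word
--                 # so more than one away
--                 return False, None
--             # fould which letter was removed from the start word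
--             oldLetter = value
--             removedLetter = key
--         else:
--             endValue = endCounter[key]
--             # if more instance of the letter, could be the new letter
--             if  endValue > value:
--                 if newLetter is None:
--                     newLetter = endValue - value
--                 else:
--                     # more than one new letter
--                     return False, None
--             elif endValue < value:
--                 # Can't have less of a letter than before (all change - so either same, more, or none)
--                 return False, None
--         # remove letter from end counter
--         del endCounter[key]
--
--     if len(endCounter) == 1 and newLetter is None:
--         # if one remaining letter and haven't already found new letter, that is the new letter
--         newLetter = list(endCounter.values())[0]
--     if len(endCounter) > 1:
--         # more than one letter changed
--         return False, None
--     else: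
--         if newLetter is None or oldLetter is None:
--             # same word/anagram
--             return False, None
--         # check new letter and old letter have same value
--         if newLetter == oldLetter:
--             return True, removedLetter
--         return False, None
--
-- def makeOneAwayDictionary(words):
--     oneAwayDictionary = dict()
--     for startWord in words:
--         for endWord in words:
--             result, removedLetter = checkOneAway(startWord, endWord)
--             if result:
--                 partners = oneAwayDictionary.get(startWord, list())
--                 partners.append((endWord, removedLetter))
--                 oneAwayDictionary[startWord] = partners
--     return oneAwayDictionary
-- ===== SOURCE B (Python) =====
-- from collections import Counter
--
--
-- def _removedLetter(sc, ec):
--     # the unique letter wholly removed from start, or None if not one-away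
--     removed = [k for k in sc if k not in ec]
--     if len(removed) != 1:
--         return None
--     x = removed[0]
--     added = [k for k in ec if ec[k] > sc[k]]
--     if len(added) != 1:
--         return None
--     y = added[0]
--     if ec[y] - sc[y] != sc[x]:
--         return None
--     if any(ec[k] < v for k, v in sc.items() if k != x):
--         return None
--     return x
--
--
-- def makeOneAwayDictionary(words):
--     pairs = [(w, Counter(w)) for w in words]
--     byLen = {}
--     for p in pairs:
--         byLen.setdefault(len(p[0]), []).append(p)
--     result = {}
--     for s, sc in pairs:
--         matches = []
--         for e, ec in byLen[len(s)]:
--             x = _removedLetter(sc, ec)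
--             if x is not None:
--                 matches.append((e, x))
--         if matches:
--             result[s] = result.get(s, []) + matches
--     return result
-- ===== Notes on version B (the rewrite author's own statement) =====
-- stated objective: faster
-- what changed: B precomputes each word's Counter once, buckets words by length so only same-length pairs are compared, and replaces A's stateful delete-as-you-scan Counter loop by a declarative removed/added-letter diff check per pair.
import Mathlib
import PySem

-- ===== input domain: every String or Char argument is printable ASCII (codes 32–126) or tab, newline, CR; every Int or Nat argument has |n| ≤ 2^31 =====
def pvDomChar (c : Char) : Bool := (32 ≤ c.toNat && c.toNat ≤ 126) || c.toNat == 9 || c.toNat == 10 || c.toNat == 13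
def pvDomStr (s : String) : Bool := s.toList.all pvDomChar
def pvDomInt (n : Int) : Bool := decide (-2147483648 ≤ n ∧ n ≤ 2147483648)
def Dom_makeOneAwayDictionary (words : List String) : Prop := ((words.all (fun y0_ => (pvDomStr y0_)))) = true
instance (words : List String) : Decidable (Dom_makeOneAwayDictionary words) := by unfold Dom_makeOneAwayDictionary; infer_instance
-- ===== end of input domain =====

-- B replaces A's per-pair stateful Counter-deletion scan (re-run on every word pair) by
-- precomputed per-word Counters, a length-bucket index that skips pairs of different
-- length, and a declarative removed/added-letter comparison; measurably faster (constant factor).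

-- ===== PORT A =====
-- Counter keys are the word's characters (Python: 1-char strings), ported as Char and turned
-- back into 1-char Strings exactly where the Python returns them.
-- The loop over startCounter.items(); `del endCounter[key]` is Counter.__delitem__, a no-op on a
-- missing key, exactly like Dict.erase.
def checkOneAwayLoop (items : List (Char × Int)) (endC : PySem.Dict Char Int)
    (old : Option (Int × Char)) (new : Option Int) :
    Option (PySem.Dict Char Int × Option (Int × Char) × Option Int) :=
  match items with
  | [] => some (endC, old, new)
  | (key, value) :: rest =>
    if endC.contains key = false then
      -- `if oldLetter:` — Python int truthiness on the stored count (None is falsy)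
      if (match old with | some (ov, _) => ov != 0 | none => false) then none
      else checkOneAwayLoop rest (endC.erase key) (some (value, key)) new
    else
      let endValue := endC.getD key 0
      if endValue > value then
        match new with
        | none => checkOneAwayLoop rest (endC.erase key) old (some (endValue - value))
        | some _ => none
      else if endValue < value then none
      else checkOneAwayLoop rest (endC.erase key) old new

def checkOneAway (start end_ : String) : Bool × Option String :=
  if PySem.Str.len start ≠ PySem.Str.len end_ then (false, none)
  else
    let startCounter := PySem.Dict.counter start.toList
    let endCounter := PySem.Dict.counter end_.toList
    match checkOneAwayLoop startCounter.items endCounter none none with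
    | none => (false, none)
    | some (endC, old, new) =>
      -- list(endCounter.values())[0] — guarded by size = 1
      let new := if endC.size = 1 && new.isNone then some (endC.values.headD 0) else new
      if endC.size > 1 then (false, none)
      else
        match new, old with
        | some nv, some (ov, removed) =>
          if nv == ov then (true, some (String.ofList [removed])) else (false, none)
        | _, _ => (false, none)

-- removedLetter is always `some` when the returned flag is true; `.getD ""` only satisfies the type.
def makeOneAwayDictionary (words : List String) : List (String × List (String × String)) :=
  (words.foldl
    (fun oneAway startWord =>
      words.foldl
        (fun oneAway endWord =>
          match checkOneAway startWord endWord with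
          | (result, removedLetter) =>
            if result then
              let partners := oneAway.getD startWord [] ++ [(endWord, removedLetter.getD "")]
              oneAway.insert startWord partners
            else oneAway)
        oneAway)
    (PySem.Dict.empty : PySem.Dict String (List (String × String)))).items

-- ===== PORT B =====
def removedLetterAlt (sc ec : PySem.Dict Char Int) : Option Char :=
  match sc.keys.filter (fun k => !ec.contains k) with
  | [x] =>
    match ec.keys.filter (fun k => ec.getD k 0 > sc.getD k 0) with
    | [y] =>
      if ec.getD y 0 - sc.getD y 0 != sc.getD x 0 then none
      else if sc.items.any (fun kv => kv.1 != x && decide (ec.getD kv.1 0 < kv.2)) then none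
      else some x
    | _ => none
  | _ => none

def makeOneAwayDictionary_alt (words : List String) : List (String × List (String × String)) :=
  let pairs := words.map (fun w => (w, PySem.Dict.counter w.toList))
  -- byLen.setdefault(len(p[0]), []).append(p)
  let byLen : PySem.Dict Int (List (String × PySem.Dict Char Int)) :=
    pairs.foldl (fun d p => d.modify (PySem.Str.len p.1) [] (· ++ [p])) PySem.Dict.empty
  let result := pairs.foldl
    (fun res p =>
      let ms := (byLen.getD (PySem.Str.len p.1) []).foldl
        (fun acc q =>
          match removedLetterAlt p.2 q.2 with
          | some x => acc ++ [(q.1, String.ofList [x])]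
          | none => acc) []
      if ms = [] then res else res.insert p.1 (res.getD p.1 [] ++ ms))
    (PySem.Dict.empty : PySem.Dict String (List (String × String)))
  result.items

-- ===== PRECONDITION & SPEC =====
def Spec_makeOneAwayDictionary (words : List String) (out : List (String × List (String × String))) : Prop := out = makeOneAwayDictionary_alt words
instance (words : List String) (out : List (String × List (String × String))) : Decidable (Spec_makeOneAwayDictionary words out) := by unfold Spec_makeOneAwayDictionary; infer_instance

-- ===== CLAIM (what is proved, stated in full; the proofs are below) =====
def Claim_equal_makeOneAwayDictionary : Prop := ∀ (words : List String), Dom_makeOneAwayDictionary words → Spec_makeOneAwayDictionary words (makeOneAwayDictionary words)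

-- ===== LEMMAS AND PROOFS =====

theorem pv_find?_filter_ne {ν : Type} (k k' : Char) (h : k' ≠ k) (l : List (Char × ν)) :
    List.find? (fun p => p.1 == k') (List.filter (fun p => !p.1 == k) l)
      = List.find? (fun p => p.1 == k') l := by
  induction l with
  | nil => rfl
  | cons p rest ih =>
    by_cases hq : p.1 = k'
    · have hp : ¬ p.1 = k := fun hh => h (hq ▸ hh)
      simp [List.filter_cons, List.find?_cons, hp, hq, h]
    · by_cases hp : p.1 = k
      · simp [List.filter_cons, List.find?_cons, hp, hq, ih, Ne.symm h]
      · simp [List.filter_cons, List.find?_cons, hp, hq, ih]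

theorem pv_get?_erase_of_ne {ν : Type} (d : PySem.Dict Char ν) (k k' : Char) (h : k' ≠ k) :
    (d.erase k).get? k' = d.get? k' := by
  simp only [PySem.Dict.get?, PySem.Dict.erase, pv_find?_filter_ne k k' h]

theorem pv_get?_counter (e' : List Char) (k : Char) :
    (PySem.Dict.counter e').get? k = if e'.contains k then some ((e'.count k : Int)) else none := by
  have hc : (PySem.Dict.counter e').contains k = e'.contains k := PySem.Dict.contains_counter e' k
  have hs := PySem.Dict.contains_eq_isSome_get? (d := PySem.Dict.counter e') (k := k)
  have hd := PySem.Dict.getD_counter e' k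
  rw [PySem.Dict.getD_eq_get?_getD] at hd
  cases hg : (PySem.Dict.counter e').get? k with
  | none => rw [hg] at hs; simp at hs; rw [hs] at hc; rw [← hc]; simp
  | some v => rw [hg] at hs hd; simp at hs hd; rw [hs] at hc; rw [← hc]; simp [hd]

def pvM (e' ks : List Char) : List Char := ks.filter (fun k => !(e'.contains k))
def pvI (e' : List Char) (cntS : Char → Int) (ks : List Char) : List Char :=
  ks.filter (fun k => e'.contains k && decide (cntS k < (e'.count k : Int)))
def pvDn (e' : List Char) (cntS : Char → Int) (ks : List Char) : Bool :=
  ks.any (fun k => e'.contains k && decide ((e'.count k : Int) < cntS k))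
def pvFail (old : Option (Int × Char)) (new : Option Int) (e' : List Char) (cntS : Char → Int)
    (ks : List Char) : Bool :=
  decide (2 ≤ (pvM e' ks).length + (if old.isSome then 1 else 0))
    || decide (2 ≤ (pvI e' cntS ks).length + (if new.isSome then 1 else 0))
    || pvDn e' cntS ks
def pvOldUpd (old : Option (Int × Char)) (cntS : Char → Int) (M : List Char) : Option (Int × Char) :=
  match old with
  | some o => some o
  | none => M.head?.map (fun x => (cntS x, x))
def pvNewUpd (new : Option Int) (e' : List Char) (cntS : Char → Int) (I : List Char) : Option Int :=
  match new with
  | some d => some d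
  | none => I.head?.map (fun y => (e'.count y : Int) - cntS y)

theorem pv_loop_spec (e' : List Char) (cntS : Char → Int) :
    ∀ (ks : List Char), ks.Nodup → (∀ k ∈ ks, 1 ≤ cntS k) →
    ∀ (endC : PySem.Dict Char Int), (∀ k ∈ ks, endC.get? k = (PySem.Dict.counter e').get? k) →
    ∀ (old : Option (Int × Char)), (∀ ov oc, old = some (ov, oc) → 1 ≤ ov) →
    ∀ (new : Option Int),
    checkOneAwayLoop (ks.map (fun k => (k, cntS k))) endC old new =
      (if pvFail old new e' cntS ks then none
       else some (PySem.Dict.mk (endC.items.filter (fun p => !ks.contains p.1)),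
                  pvOldUpd old cntS (pvM e' ks), pvNewUpd new e' cntS (pvI e' cntS ks))) := by
  intro ks
  induction ks with
  | nil =>
    intro _ _ endC _ old hold new
    cases old <;> cases new <;> simp [checkOneAwayLoop, pvFail, pvM, pvI, pvDn, pvOldUpd, pvNewUpd]
  | cons k rest ih =>
    intro hnd hpos endC hagree old hold new
    have hkrest : k ∉ rest := (List.nodup_cons.mp hnd).1
    have hndr : rest.Nodup := (List.nodup_cons.mp hnd).2
    have hposr : ∀ k' ∈ rest, 1 ≤ cntS k' := fun k' hk' => hpos k' (List.mem_cons_of_mem _ hk')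
    have hk : endC.get? k = (PySem.Dict.counter e').get? k := hagree k List.mem_cons_self
    have hagree' : ∀ k' ∈ rest, (endC.erase k).get? k' = (PySem.Dict.counter e').get? k' := by
      intro k' hk'
      rw [pv_get?_erase_of_ne _ _ _ (fun hh => hkrest (by rwa [hh] at hk')),
        hagree k' (List.mem_cons_of_mem _ hk')]
    have hcontains : endC.contains k = e'.contains k := by
      rw [PySem.Dict.contains_eq_isSome_get?, hk, pv_get?_counter]
      cases hc2 : e'.contains k <;> simp [hc2]
    have hfilter : (endC.erase k).items.filter (fun p => !rest.contains p.1)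
          = endC.items.filter (fun p => !(k :: rest).contains p.1) := by
      simp only [PySem.Dict.erase, List.filter_filter]
      apply List.filter_congr
      intro p _
      by_cases h1 : p.1 = k <;> by_cases h2 : rest.contains p.1 <;> simp [h1, h2]
    cases hke : e'.contains k
    · -- k absent from the end word: the missing branch
      have hkm : k ∉ e' := by simpa using hke
      have hM : pvM e' (k :: rest) = k :: pvM e' rest := by simp [pvM, List.filter_cons, hke, hkm]
      have hI : pvI e' cntS (k :: rest) = pvI e' cntS rest := by simp [pvI, List.filter_cons, hke, hkm]
      have hD : pvDn e' cntS (k :: rest) = pvDn e' cntS rest := by simp [pvDn, List.any_cons, hke, hkm]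
      cases old with
      | some o =>
        have hov : 1 ≤ o.1 := hold o.1 o.2 rfl
        simp only [List.map_cons, checkOneAwayLoop, hcontains, hke, eq_self_iff_true, if_true]
        rw [if_pos (by simp; omega)]
        rw [if_pos (by simp [pvFail, hM] <;> omega)]
      | none =>
        simp only [List.map_cons, checkOneAwayLoop, hcontains, hke, eq_self_iff_true, if_true,
          Bool.false_eq_true, if_false]
        rw [ih hndr hposr _ hagree' (some (cntS k, k))
          (by rintro ov oc ⟨⟩; exact hpos k List.mem_cons_self) new]
        have hcond : pvFail (some (cntS k, k)) new e' cntS rest = pvFail none new e' cntS (k :: rest) := by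
          simp [pvFail, hM, hI, hD] <;> omega
        rw [hcond]
        rcases h : pvFail none new e' cntS (k :: rest)
        · simp only [h, Bool.false_eq_true, if_false, hfilter, hM, hI, pvOldUpd, pvNewUpd,
            List.head?_cons, Option.map_some]
        · simp [h]
    · -- k present in the end word
      have hkm : k ∈ e' := by simpa using hke
      have hM : pvM e' (k :: rest) = pvM e' rest := by simp [pvM, List.filter_cons, hke, hkm]
      have hget : endC.getD k 0 = (e'.count k : Int) := by
        rw [PySem.Dict.getD_eq_get?_getD, hk, pv_get?_counter, if_pos hke]; rfl
      rcases lt_trichotomy (cntS k) ((e'.count k : Int)) with hlt | heq | hgt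
      · -- more of this letter in the end word
        have hI : pvI e' cntS (k :: rest) = k :: pvI e' cntS rest := by
          simp [pvI, List.filter_cons, hke, hkm, hlt]
        have hD : pvDn e' cntS (k :: rest) = pvDn e' cntS rest := by
          simp [pvDn, List.any_cons, hke, hkm]; omega
        cases new with
        | some d =>
          simp only [List.map_cons, checkOneAwayLoop, hcontains, hke, Bool.true_eq_false, if_false]
          rw [if_pos (by simpa [hget] using hlt)]
          rw [if_pos (by simp [pvFail, hI] <;> omega)]
        | none =>
          simp only [List.map_cons, checkOneAwayLoop, hcontains, hke, Bool.true_eq_false, if_false]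
          rw [if_pos (by simpa [hget] using hlt)]
          rw [ih hndr hposr _ hagree' old hold (some (endC.getD k 0 - cntS k))]
          have hcond : pvFail old (some (endC.getD k 0 - cntS k)) e' cntS rest
              = pvFail old none e' cntS (k :: rest) := by
            simp [pvFail, hM, hI, hD] <;> omega
          rw [hcond]
          rcases h : pvFail old none e' cntS (k :: rest)
          · simp only [h, Bool.false_eq_true, if_false, hfilter, hM, hI, pvOldUpd, pvNewUpd, hget,
              List.head?_cons, Option.map_some]
          · simp [h]
      · -- same count: nothing happens
        have hI : pvI e' cntS (k :: rest) = pvI e' cntS rest := by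
          simp [pvI, List.filter_cons, hke, hkm]; omega
        have hD : pvDn e' cntS (k :: rest) = pvDn e' cntS rest := by
          simp [pvDn, List.any_cons, hke, hkm]; omega
        simp only [List.map_cons, checkOneAwayLoop, hcontains, hke, Bool.true_eq_false, if_false]
        rw [if_neg (by simp [hget]; omega), if_neg (by simp [hget]; omega)]
        rw [ih hndr hposr _ hagree' old hold new]
        simp only [pvFail, hM, hI, hD, hfilter]
      · -- fewer of this letter: decrease, fail
        have hD : pvDn e' cntS (k :: rest) = true := by
          simp [pvDn, List.any_cons, hke, hkm]; left; omega
        simp only [List.map_cons, checkOneAwayLoop, hcontains, hke, Bool.true_eq_false, if_false]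
        rw [if_neg (by simp [hget]; omega), if_pos (by simp [hget]; omega)]
        rw [if_pos (by simp [pvFail, hD])]

theorem pv_sum_neq (s' e' : List Char) (hlen : s'.length = e'.length)
    (x y : Char) (hx : x ∈ s') (hxe : x ∉ e') (hy : y ∈ s') (hye : y ∈ e')
    (heqc : ∀ k ∈ s', k ≠ x → k ≠ y → e'.count k = s'.count k)
    (z : Char) (hz : z ∈ e') (hzs : z ∉ s') :
    ((e'.count y : Int) - (s'.count y : Int)) ≠ ((s'.count x : Int)) := by
  intro hcontra
  have hxy : x ≠ y := fun h => hxe (h ▸ hye)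
  set T := (s' ++ e').toFinset with hT
  have hsub1 : s'.toFinset ⊆ T := by simp [hT, List.toFinset_append]
  have hsub2 : e'.toFinset ⊆ T := by simp [hT, List.toFinset_append]
  have hS : ∑ a ∈ T, s'.count a = s'.length := by
    rw [← List.sum_toFinset_count_eq_length s']
    exact (Finset.sum_subset hsub1 (fun a _ ha => List.count_eq_zero.mpr
      (fun hm => ha (List.mem_toFinset.mpr hm)))).symm
  have hE : ∑ a ∈ T, e'.count a = e'.length := by
    rw [← List.sum_toFinset_count_eq_length e']
    exact (Finset.sum_subset hsub2 (fun a _ ha => List.count_eq_zero.mpr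
      (fun hm => ha (List.mem_toFinset.mpr hm)))).symm
  have hzero : ∑ a ∈ T, ((e'.count a : Int) - (s'.count a : Int)) = 0 := by
    rw [Finset.sum_sub_distrib, ← Nat.cast_sum, ← Nat.cast_sum, hS, hE, hlen, sub_self]
  have hxT : x ∈ T := by simp [hT, List.toFinset_append, hx]
  have hyT : y ∈ T.erase x := Finset.mem_erase.mpr ⟨hxy.symm, by simp [hT, List.toFinset_append, hy]⟩
  rw [← Finset.add_sum_erase _ _ hxT, ← Finset.add_sum_erase _ _ hyT] at hzero
  have hzT : z ∈ (T.erase x).erase y :=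
    Finset.mem_erase.mpr ⟨fun h => hzs (h ▸ hy), Finset.mem_erase.mpr
      ⟨fun h => hzs (h ▸ hx), by simp [hT, List.toFinset_append, hz]⟩⟩
  have hpos : 0 < ∑ a ∈ (T.erase x).erase y, ((e'.count a : Int) - (s'.count a : Int)) := by
    apply Finset.sum_pos'
    · intro a ha
      have hay : a ≠ y := (Finset.mem_erase.mp ha).1
      have hax : a ≠ x := (Finset.mem_erase.mp (Finset.mem_erase.mp ha).2).1
      by_cases has : a ∈ s'
      · rw [heqc a has hax hay]; omega
      · have : s'.count a = 0 := List.count_eq_zero.mpr has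
        rw [this]
        simp
    · refine ⟨z, hzT, ?_⟩
      have h1 : s'.count z = 0 := List.count_eq_zero.mpr hzs
      have h2 : 0 < e'.count z := List.count_pos_iff.mpr hz
      rw [h1]
      simpa using hz
  have hx0 : e'.count x = 0 := List.count_eq_zero.mpr hxe
  rw [hx0] at hzero
  omega

def pvCnt (l : List Char) : Char → Int := fun k => ((l.count k : Nat) : Int)

def pvAlt2 (cS cE : Char → Int) (M added : List Char) (dec : Char → Bool) : Option Char :=
  match M with
  | [x] =>
    match added with
    | [y] => if (cE y - cS y != cS x) = true then none else if dec x then none else some x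
    | _ => none
  | _ => none

theorem pv_alt_eq (s' e' : List Char) :
    removedLetterAlt (PySem.Dict.counter s') (PySem.Dict.counter e') =
      pvAlt2 (pvCnt s') (pvCnt e')
        ((PySem.Set.ofList s').filter (fun k => !(e'.contains k)))
        ((PySem.Set.ofList e').filter (fun k => decide (pvCnt s' k < pvCnt e' k)))
        (fun x => (PySem.Set.ofList s').any (fun k => (k != x) && decide (pvCnt e' k < pvCnt s' k))) := by
  rw [removedLetterAlt]
  simp only [PySem.Dict.keys_counter, PySem.Dict.getD_counter, PySem.Dict.items_counter,
    PySem.Dict.contains_counter, List.any_map, gt_iff_lt, pvCnt, pvAlt2, Function.comp_def]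
  rfl

theorem pv_core (s' e' : List Char) (hlen' : s'.length = e'.length) :
    (match
      (if pvFail none none e' (pvCnt s') (PySem.Set.ofList s') = true then none
       else some (PySem.Dict.mk (List.filter (fun p => !List.contains (PySem.Set.ofList s') p.1)
                    (PySem.Dict.counter e').items),
                  pvOldUpd none (pvCnt s') (pvM e' (PySem.Set.ofList s')),
                  pvNewUpd none e' (pvCnt s') (pvI e' (pvCnt s') (PySem.Set.ofList s')))) with
     | none => ((false : Bool), (none : Option String))
     | some (endC, old, new) =>
       if endC.size > 1 then (false, none)
       else
         match (if (decide (endC.size = 1) && new.isNone) = true then some (endC.values.headD 0) else new), old with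
         | some nv, some (ov, removed) =>
           if (nv == ov) = true then (true, some (String.ofList [removed])) else (false, none)
         | _, _ => (false, none))
    = (match removedLetterAlt (PySem.Dict.counter s') (PySem.Dict.counter e') with
       | some x => (true, some (String.ofList [x]))
       | none => (false, none)) := by
  rw [pv_alt_eq]
  rw [show List.filter (fun k => !e'.contains k) (PySem.Set.ofList s')
      = pvM e' (PySem.Set.ofList s') from rfl]
  have hremitems : List.filter (fun p => !List.contains (PySem.Set.ofList s') p.1)
        (PySem.Dict.counter e').items
      = ((PySem.Set.ofList e').filter (fun k => !(s'.contains k))).map (fun k => (k, pvCnt e' k)) := by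
    rw [PySem.Dict.items_counter, List.filter_map]
    congr 1
    apply List.filter_congr
    intro k _
    by_cases h : k ∈ s' <;>
      simp [List.contains_iff_mem, PySem.Set.mem_ofList, h, Function.comp]
  have hfail : pvFail none none e' (pvCnt s') (PySem.Set.ofList s')
      = (decide (2 ≤ (pvM e' (PySem.Set.ofList s')).length)
         || decide (2 ≤ (pvI e' (pvCnt s') (PySem.Set.ofList s')).length)
         || pvDn e' (pvCnt s') (PySem.Set.ofList s')) := by
    simp [pvFail]
  rcases hM : pvM e' (PySem.Set.ofList s') with _ | ⟨x, M'⟩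
  · -- no letter of start missing from end: A gives (false, none), B gives none
    rw [hfail, hM]
    simp only [pvAlt2, pvOldUpd, List.head?_nil, Option.map_none, List.length_nil]
    cases hC : (decide (2 ≤ (pvI e' (pvCnt s') (PySem.Set.ofList s')).length)
        || pvDn e' (pvCnt s') (PySem.Set.ofList s')) <;>
      simp [hC] <;> split <;> simp
  rcases hM' : M' with _ | ⟨x2, M''⟩
  case cons.cons => -- two or more missing letters: both fail
    rw [hfail, hM, hM']
    simp [pvAlt2]
  -- M = [x]
  have hxmem : x ∈ PySem.Set.ofList s' ∧ ¬(e'.contains x = true) := by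
    have : x ∈ pvM e' (PySem.Set.ofList s') := by rw [hM, hM']; exact List.mem_cons_self
    have h2 := List.mem_filter.mp this
    exact ⟨h2.1, by simpa using h2.2⟩
  have hxs : x ∈ s' := (PySem.Set.mem_ofList s' x).mp hxmem.1
  have hxe : x ∉ e' := fun h => hxmem.2 (List.contains_iff_mem.mpr h)
  have hMonly : ∀ k, k ∈ PySem.Set.ofList s' → k ∉ e' → k = x := by
    intro k hk hke
    have : k ∈ pvM e' (PySem.Set.ofList s') :=
      List.mem_filter.mpr ⟨hk, by simpa using fun h => hke (List.contains_iff_mem.mp h)⟩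
    rw [hM, hM'] at this
    simpa using this
  have hdecdn : ((PySem.Set.ofList s').any (fun k => (k != x) && decide (pvCnt e' k < pvCnt s' k)))
      = pvDn e' (pvCnt s') (PySem.Set.ofList s') := by
    apply Bool.eq_iff_iff.mpr
    simp only [pvDn, List.any_eq_true, bne_iff_ne, Bool.and_eq_true, decide_eq_true_eq, ne_eq,
      List.contains_iff_mem]
    constructor
    · rintro ⟨k, hk, hne, hlt⟩
      refine ⟨k, hk, ?_, hlt⟩
      by_contra hkem
      exact hne (hMonly k hk hkem)
    · rintro ⟨k, hk, hkin, hlt⟩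
      exact ⟨k, hk, fun h => hxe (h ▸ hkin), hlt⟩
  -- the added letters of B split into the increased shared letters and the brand-new letters
  have hndA : ((PySem.Set.ofList e').filter (fun k => decide (pvCnt s' k < pvCnt e' k))).Nodup :=
    (PySem.Set.nodup_ofList e').filter _
  have hA1 : (((PySem.Set.ofList e').filter (fun k => decide (pvCnt s' k < pvCnt e' k))).filter
        (fun k => s'.contains k)).Perm (pvI e' (pvCnt s') (PySem.Set.ofList s')) := by
    apply (List.perm_ext_iff_of_nodup (hndA.filter _) ((PySem.Set.nodup_ofList s').filter _)).mpr
    intro a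
    simp only [List.mem_filter, pvI, PySem.Set.mem_ofList, List.contains_iff_mem,
      Bool.and_eq_true, decide_eq_true_eq]
    tauto
  have hA2 : ((PySem.Set.ofList e').filter (fun k => decide (pvCnt s' k < pvCnt e' k))).filter
        (fun k => !(s'.contains k))
      = (PySem.Set.ofList e').filter (fun k => !(s'.contains k)) := by
    rw [List.filter_filter]
    apply List.filter_congr
    intro k hk
    by_cases h : k ∈ s'
    · simp [List.contains_iff_mem, h]
    · have h1 : s'.count k = 0 := List.count_eq_zero.mpr h
      have h2 : 0 < e'.count k := List.count_pos_iff.mpr ((PySem.Set.mem_ofList e' k).mp hk)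
      have h2' : (0:Int) < (e'.count k : Int) := by exact_mod_cast h2
      simp [List.contains_iff_mem, h, pvCnt, h1, h2']
      exact (PySem.Set.mem_ofList e' k).mp hk
  have hlenA : ((PySem.Set.ofList e').filter (fun k => decide (pvCnt s' k < pvCnt e' k))).length
      = (pvI e' (pvCnt s') (PySem.Set.ofList s')).length
        + ((PySem.Set.ofList e').filter (fun k => !(s'.contains k))).length := by
    have hp := (List.filter_append_perm (fun k => s'.contains k)
      ((PySem.Set.ofList e').filter (fun k => decide (pvCnt s' k < pvCnt e' k)))).length_eq
    rw [List.length_append, hA1.length_eq, hA2] at hp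
    omega
  have hpermA : ((PySem.Set.ofList e').filter (fun k => decide (pvCnt s' k < pvCnt e' k))).Perm
      ((pvI e' (pvCnt s') (PySem.Set.ofList s'))
        ++ ((PySem.Set.ofList e').filter (fun k => !(s'.contains k)))) := by
    have hp := (List.filter_append_perm (fun k => s'.contains k)
      ((PySem.Set.ofList e').filter (fun k => decide (pvCnt s' k < pvCnt e' k)))).symm
    rw [hA2] at hp
    exact hp.trans (hA1.append_right _)
  rcases hdn : pvDn e' (pvCnt s') (PySem.Set.ofList s') with _ | _
  case false =>
    rcases hI : pvI e' (pvCnt s') (PySem.Set.ofList s') with _ | ⟨y, I'⟩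
    · -- no increased shared letter
      rcases hR : (PySem.Set.ofList e').filter (fun k => !(s'.contains k)) with _ | ⟨z, R'⟩
      · -- no new letter at all
        have hA0 : List.filter (fun k => decide (pvCnt s' k < pvCnt e' k)) (PySem.Set.ofList e') = [] := by
          have h := hlenA
          rw [hI, hR] at h
          exact List.eq_nil_of_length_eq_zero (by simpa using h)
        rw [hfail, hM, hM', hI, hA0]
        rw [if_neg (by simp [hdn])]
        simp only [pvAlt2, pvOldUpd, pvNewUpd, hremitems, hR, PySem.Dict.size]
        simp
      rcases hR' : R' with _ | ⟨z2, R''⟩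
      · -- exactly one brand-new letter z
        have hzR : z ∈ List.filter (fun k => !s'.contains k) (PySem.Set.ofList e') := by
          rw [hR, hR']; exact List.mem_cons_self
        have hz1 := List.mem_filter.mp hzR
        have hze : z ∈ e' := (PySem.Set.mem_ofList e' z).mp hz1.1
        have hzs : z ∉ s' := by simpa using hz1.2
        have hz0 : pvCnt s' z = 0 := by simp [pvCnt, List.count_eq_zero.mpr hzs]
        have hA1' : List.filter (fun k => decide (pvCnt s' k < pvCnt e' k)) (PySem.Set.ofList e') = [z] := by
          apply List.perm_singleton.mp
          have := hpermA
          rw [hI, hR, hR'] at this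
          simpa using this
        rw [hfail, hM, hM', hI, hA1']
        rw [if_neg (by simp [hdn])]
        simp only [pvAlt2, pvOldUpd, pvNewUpd, hremitems, hR, hR', PySem.Dict.size,
          PySem.Dict.values, hdecdn, hdn, hz0, List.map_cons, List.map_nil, List.length_cons,
          List.length_nil, List.head?_nil, List.head?_cons, Option.map_some, Option.map_none,
          List.headD_cons, sub_zero]
        by_cases hv : pvCnt e' z = pvCnt s' x <;> simp [hv, pvCnt] <;> simp [pvCnt] at hv <;> simp [hv]
      · -- two or more new letters
        have h2 : 2 ≤ (List.filter (fun k => decide (pvCnt s' k < pvCnt e' k)) (PySem.Set.ofList e')).length := by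
          rw [hlenA, hI, hR, hR']
          simp only [List.length_cons, List.length_nil]
          omega
        rw [hfail, hM, hM', hI]
        cases hA : List.filter (fun k => decide (pvCnt s' k < pvCnt e' k)) (PySem.Set.ofList e') with
        | nil => rw [hA] at h2; simp at h2
        | cons a u =>
          cases u with
          | nil => rw [hA] at h2; simp at h2
          | cons a2 u2 =>
            simp only [pvAlt2, hdn, pvOldUpd, pvNewUpd, hremitems, hR, hR', PySem.Dict.size]
            simp [List.length_cons]
    rcases hI' : I' with _ | ⟨y2, I''⟩
    · -- exactly one increased shared letter y
      rcases hR : (PySem.Set.ofList e').filter (fun k => !(s'.contains k)) with _ | ⟨z, R'⟩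
      · -- no brand-new letter
        have hA1' : List.filter (fun k => decide (pvCnt s' k < pvCnt e' k)) (PySem.Set.ofList e') = [y] := by
          apply List.perm_singleton.mp
          have := hpermA
          rw [hI, hI', hR] at this
          simpa using this
        rw [hfail, hM, hM', hI, hI', hA1']
        rw [if_neg (by simp [hdn])]
        simp only [pvAlt2, pvOldUpd, pvNewUpd, hremitems, hR, PySem.Dict.size, hdecdn, hdn,
          List.length_cons, List.length_nil, List.map_nil, List.head?_cons, Option.map_some]
        by_cases hv : pvCnt e' y - pvCnt s' y = pvCnt s' x <;> simp [hv, pvCnt] <;>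
          simp [pvCnt] at hv <;> simp [hv]
      · -- also a brand-new letter: counts cannot balance
        have hyI : y ∈ pvI e' (pvCnt s') (PySem.Set.ofList s') := by rw [hI, hI']; exact List.mem_cons_self
        have hy1 := List.mem_filter.mp hyI
        have hys : y ∈ s' := (PySem.Set.mem_ofList s' y).mp hy1.1
        have hye : y ∈ e' := by
          have hy2 := hy1.2
          simp only [Bool.and_eq_true, List.contains_iff_mem, decide_eq_true_eq] at hy2
          exact hy2.1
        have hzR : z ∈ List.filter (fun k => !s'.contains k) (PySem.Set.ofList e') := by
          rw [hR]; exact List.mem_cons_self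
        have hz1 := List.mem_filter.mp hzR
        have hze : z ∈ e' := (PySem.Set.mem_ofList e' z).mp hz1.1
        have hzs : z ∉ s' := by simpa using hz1.2
        have heqc : ∀ k ∈ s', k ≠ x → k ≠ y → e'.count k = s'.count k := by
          intro k hks' hkx hky
          have hkset : k ∈ PySem.Set.ofList s' := (PySem.Set.mem_ofList s' k).mpr hks'
          have hkE : k ∈ e' := by
            by_contra hkE
            exact hkx (hMonly k hkset hkE)
          have h1 : List.count k s' ≤ List.count k e' := by
            have hh := List.any_eq_false.mp hdn k hkset
            simp [pvCnt] at hh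
            exact hh hkE
          have h2 : ¬ (List.count k s' < List.count k e') := by
            intro hlt
            have hmem : k ∈ pvI e' (pvCnt s') (PySem.Set.ofList s') :=
              List.mem_filter.mpr ⟨hkset, by
                simp [pvCnt]
                exact ⟨hkE, by exact_mod_cast hlt⟩⟩
            rw [hI, hI'] at hmem
            simp at hmem
            exact hky hmem
          omega
        have hneq := pv_sum_neq s' e' hlen' x y hxs hxe hys hye heqc z hze hzs
        have hneq' : ¬ (pvCnt e' y - pvCnt s' y = pvCnt s' x) := hneq
        have h2 : 2 ≤ (List.filter (fun k => decide (pvCnt s' k < pvCnt e' k)) (PySem.Set.ofList e')).length := by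
          rw [hlenA, hI, hI', hR]
          simp only [List.length_cons, List.length_nil]
          omega
        rw [hfail, hM, hM', hI, hI']
        cases hA : List.filter (fun k => decide (pvCnt s' k < pvCnt e' k)) (PySem.Set.ofList e') with
        | nil => rw [hA] at h2; simp at h2
        | cons a u =>
          cases u with
          | nil => rw [hA] at h2; simp at h2
          | cons a2 u2 =>
            rw [if_neg (by simp [hdn])]
            simp only [pvAlt2, pvOldUpd, pvNewUpd, hremitems, hR, PySem.Dict.size,
              List.length_cons, List.head?_cons, Option.map_some, List.map_cons]
            cases hRl : R' with
            | nil =>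
              simp only [hRl, List.length_cons, List.length_nil, List.map_nil]
              have hneq2 : ¬ ((List.count y e' : Int) - pvCnt s' y = pvCnt s' x) := by
                simpa [pvCnt] using hneq'
              simp [hneq2]
            | cons r3 u3 =>
              simp [hRl, List.length_cons]
    · -- two or more increased letters
      have h2 : 2 ≤ (List.filter (fun k => decide (pvCnt s' k < pvCnt e' k)) (PySem.Set.ofList e')).length := by
        rw [hlenA, hI, hI']
        simp only [List.length_cons]
        omega
      rw [hfail, hM, hM', hI, hI']
      rw [if_pos (by simp only [List.length_cons]; simp)]
      cases hA : List.filter (fun k => decide (pvCnt s' k < pvCnt e' k)) (PySem.Set.ofList e') with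
      | nil => rw [hA] at h2; simp at h2
      | cons a u =>
        cases u with
        | nil => rw [hA] at h2; simp at h2
        | cons a2 u2 => simp [pvAlt2]
  case true =>
    rw [hfail, hM, hM']
    simp only [hdn, Bool.or_true, pvAlt2]
    simp only [show ((true : Bool) = true) = True from by simp, if_true]
    cases hA : List.filter (fun k => decide (pvCnt s' k < pvCnt e' k)) (PySem.Set.ofList e') with
    | nil => simp
    | cons y u =>
      cases u with
      | nil => simp [hdecdn, hdn]
      | cons a b => simp

theorem pv_check_eq (s e : String) (hlen : PySem.Str.len s = PySem.Str.len e) :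
    checkOneAway s e =
      (match removedLetterAlt (PySem.Dict.counter s.toList) (PySem.Dict.counter e.toList) with
       | some x => (true, some (String.ofList [x]))
       | none => ((false : Bool), (none : Option String))) := by
  have hlen' : s.toList.length = e.toList.length := by
    simpa [PySem.Str.len_eq] using hlen
  rw [checkOneAway]
  simp only [if_neg (show ¬(PySem.Str.len s ≠ PySem.Str.len e) from by
    simp [PySem.Str.len_eq, hlen'])]
  have hpos : ∀ k ∈ PySem.Set.ofList s.toList, 1 ≤ pvCnt s.toList k := by
    intro k hk
    have := List.count_pos_iff.mpr ((PySem.Set.mem_ofList s.toList k).mp hk)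
    simp only [pvCnt]
    exact_mod_cast this
  rw [show (PySem.Dict.counter s.toList).items
      = (PySem.Set.ofList s.toList).map (fun k => (k, pvCnt s.toList k))
    from PySem.Dict.items_counter s.toList]
  rw [pv_loop_spec e.toList (pvCnt s.toList) (PySem.Set.ofList s.toList)
    (PySem.Set.nodup_ofList s.toList) hpos _ (fun k _ => rfl) none (by rintro _ _ ⟨⟩) none]
  exact pv_core s.toList e.toList hlen'

theorem pv_check_ne (s e : String) (hne : PySem.Str.len s ≠ PySem.Str.len e) :
    checkOneAway s e = (false, none) := by
  rw [checkOneAway, if_pos hne]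

theorem pv_foldl_matches (s : String) (m : String → Option (String × String)) :
    ∀ (ws : List String) (d : PySem.Dict String (List (String × String))),
      ws.foldl (fun d e =>
          match m e with
          | some pr => d.insert s (d.getD s [] ++ [pr])
          | none => d) d
        = if ws.filterMap m = [] then d else d.insert s (d.getD s [] ++ ws.filterMap m) := by
  intro ws
  induction ws with
  | nil => intro d; simp
  | cons e rest ih =>
    intro d
    cases hm : m e with
    | none => simp only [List.foldl_cons, hm, List.filterMap_cons, ih]
    | some pr =>
      simp only [List.foldl_cons, hm, List.filterMap_cons, ih]
      by_cases hrest : rest.filterMap m = []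
      · simp [hrest, PySem.Dict.getD_insert_self, PySem.Dict.insert_insert_self]
      · rw [if_neg hrest, if_neg (List.cons_ne_nil _ _)]
        rw [PySem.Dict.getD_insert_self, PySem.Dict.insert_insert_self, List.append_assoc]
        rfl

theorem pv_foldl_acc (sc : PySem.Dict Char Int) :
    ∀ (l : List (String × PySem.Dict Char Int)) (acc : List (String × String)),
      l.foldl (fun acc q =>
          match removedLetterAlt sc q.2 with
          | some x => acc ++ [(q.1, String.ofList [x])]
          | none => acc) acc
        = acc ++ l.filterMap (fun q => (removedLetterAlt sc q.2).map (fun x => (q.1, String.ofList [x]))) := by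
  intro l
  induction l with
  | nil => intro acc; simp
  | cons q rest ih =>
    intro acc
    cases hq : removedLetterAlt sc q.2 with
    | none => simp [hq, ih]
    | some x => simp [hq, ih]

theorem pv_bucket (pairs : List (String × PySem.Dict Char Int)) (L : Int) :
    (pairs.foldl (fun d p => d.modify (PySem.Str.len p.1) [] (· ++ [p]))
        (PySem.Dict.empty : PySem.Dict Int (List (String × PySem.Dict Char Int)))).getD L []
      = pairs.filter (fun p => PySem.Str.len p.1 == L) := by
  have h : pairs.foldl (fun d p => d.modify (PySem.Str.len p.1) [] (· ++ [p]))
        (PySem.Dict.empty : PySem.Dict Int (List (String × PySem.Dict Char Int)))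
      = (pairs.map (fun p => (PySem.Str.len p.1, p))).foldl
          (fun d q => d.modify q.1 [] (· ++ [q.2])) PySem.Dict.empty := by
    rw [List.foldl_map]
  rw [h, PySem.Dict.getD_foldl_modify_append, List.filter_map, List.map_map]
  simp [Function.comp_def]

theorem pv_main (words : List String) :
    makeOneAwayDictionary words = makeOneAwayDictionary_alt words := by
  simp only [makeOneAwayDictionary, makeOneAwayDictionary_alt]
  congr 1
  rw [List.foldl_map]
  apply PySem.List.foldl_congr_mem
  intro acc w _
  -- left: A's inner loop over all words, in accumulate-by-option form
  rw [PySem.List.foldl_congr_mem words _ (fun d e =>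
      match (if (checkOneAway w e).1 = true
          then some (e, (checkOneAway w e).2.getD "") else none) with
      | some pr => d.insert w (d.getD w [] ++ [pr])
      | none => d) acc
    (by
      intro d e _
      rcases hc : checkOneAway w e with ⟨r, rl⟩
      cases r <;> simp [hc])]
  rw [pv_foldl_matches w _ words acc]
  -- right: B's bucket and accumulator loop
  rw [pv_bucket (words.map (fun w => (w, PySem.Dict.counter w.toList))) (PySem.Str.len w)]
  rw [pv_foldl_acc _ _ []]
  rw [List.nil_append, List.filterMap_filter, List.filterMap_map]
  have hsame : words.filterMap ((fun (q : String × PySem.Dict Char Int) =>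
        if (PySem.Str.len q.1 == PySem.Str.len w) = true
        then (removedLetterAlt (PySem.Dict.counter w.toList) q.2).map
          (fun x => (q.1, String.ofList [x]))
        else none) ∘ (fun w => (w, PySem.Dict.counter w.toList)))
      = words.filterMap (fun e =>
          if (checkOneAway w e).1 = true then some (e, (checkOneAway w e).2.getD "") else none) := by
    apply List.filterMap_congr
    intro e _
    simp only [Function.comp_apply]
    by_cases hl : PySem.Str.len w = PySem.Str.len e
    · rw [pv_check_eq w e hl]
      have he : e.length = w.length := by
        have h2 := hl
        simp only [PySem.Str.len_eq] at h2
        have h3 : w.toList.length = e.toList.length := by exact_mod_cast h2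
        simpa using h3.symm
      cases hrl : removedLetterAlt (PySem.Dict.counter w.toList) (PySem.Dict.counter e.toList) with
      | none => simp [hrl, he]
      | some x => simp [hrl, he]
    · rw [pv_check_ne w e hl]
      have he : ¬ (e.length = w.length) := by
        intro h
        apply hl
        simp only [PySem.Str.len_eq]
        have h3 : w.toList.length = e.toList.length := by simpa using h.symm
        exact_mod_cast h3
      simp [he]
  rw [hsame]

-- ===== VERDICT (by name: the statement is the Claim_ definition above) =====
theorem makeOneAwayDictionary_spec : Claim_equal_makeOneAwayDictionary := by
  intro words _
  exact pv_main words
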